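-- pv_equiv track=rewrite | github.com/YikesItsSykes/DGCV | src/dgcv/printing/_string_processing.py | _collapse_double_braces
-- ===== SOURCE A (Python) =====
-- def _collapse_double_braces(s: str) -> str:
--     out = []
--     i = 0
--     n = len(s)
--     while i < n:
--         if s[i] == "{" and i + 1 < n and s[i + 1] == "{":
--             depth = 0
--             j = i
--             last = None
--             while j < n:
--                 c = s[j]
--                 if c == "{":
--                     depth += 1
--                 elif c == "}":
--                     depth -= 1
--                     if depth == 0:
--                         last = j
--                         break
--                 j += 1
--             if last is not None and last > i + 1 and s[last - 1] == "}":
--                 inner = s[i + 2 : last - 1]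
--                 inner = _collapse_double_braces(inner)
--                 out.append("{")
--                 out.append(inner)
--                 out.append("}")
--                 i = last + 1
--                 continue
--         out.append(s[i])
--         i += 1
--     return "".join(out)
-- ===== SOURCE B (Python) =====
-- def _collapse_double_braces(s: str) -> str:
--     # One stack pass precomputes the matching '}' for every '{'; the recursion
--     # then works over index ranges of the original string with table lookups
--     # instead of re-scanning and re-slicing.
--     n = len(s)
--     match = {}
--     stack = []
--     for idx in range(n):
--         c = s[idx]
--         if c == "{":
--             stack.append(idx)
--         elif c == "}" and stack:
--             match[stack.pop()] = idx
--
--     def go(lo: int, hi: int) -> str: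
--         parts = []
--         i = lo
--         while i < hi:
--             if s[i] == "{" and i + 1 < hi and s[i + 1] == "{":
--                 m = match.get(i)
--                 if m is not None and m < hi and s[m - 1] == "}":
--                     parts.append("{")
--                     parts.append(go(i + 2, m - 1))
--                     parts.append("}")
--                     i = m + 1
--                     continue
--             parts.append(s[i])
--             i += 1
--         return "".join(parts)
--
--     return go(0, n)
-- ===== Notes on version B (the rewrite author's own statement) =====
-- stated objective: alternative
-- what changed: Instead of re-running a forward depth scan for every '{{' and recursing on freshly copied slices, B precomputes the matching '}' for every '{' in one stack pass and processes index ranges of the original string with table lookups.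
import Mathlib
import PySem

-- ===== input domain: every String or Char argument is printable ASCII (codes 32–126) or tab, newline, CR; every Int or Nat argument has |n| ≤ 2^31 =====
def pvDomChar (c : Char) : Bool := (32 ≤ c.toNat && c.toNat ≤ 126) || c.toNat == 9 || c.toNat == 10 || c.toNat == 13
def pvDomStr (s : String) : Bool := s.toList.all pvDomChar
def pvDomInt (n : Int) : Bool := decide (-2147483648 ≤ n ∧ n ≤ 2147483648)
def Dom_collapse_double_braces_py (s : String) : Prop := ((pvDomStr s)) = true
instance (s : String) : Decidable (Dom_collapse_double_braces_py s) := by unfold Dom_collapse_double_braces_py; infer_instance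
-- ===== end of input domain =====

-- B replaces A's per-call forward depth scan and recursion on fresh slices by one
-- stack pass that precomputes every '{'-to-'}' match, then recurses over index
-- ranges of the original string with table lookups (objective: alternative
-- algorithm, same cost). Equivalence of the return value is proved for all strings.

-- ===== PORT A =====
-- A's inner `while j < n` depth scan, on the remaining suffix; returns the offset
-- of the '}' where depth first returns to 0 (A's `last`, relative to the scan start).
def scanACD : List Char → Int → Option Nat
  | [], _ => none
  | c :: rest, depth =>
    if c = '{' then (scanACD rest (depth + 1)).map (· + 1)
    else if c = '}' then
      if depth - 1 = 0 then some 0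
      else (scanACD rest (depth - 1)).map (· + 1)
    else (scanACD rest depth).map (· + 1)

-- A's outer `while i < n` loop, as recursion on the remaining suffix `cs` (= s[i:]);
-- offsets are relative to the current position.
def loopACD : List Char → List Char
  | [] => []
  | c :: rest =>
    if c = '{' ∧ (c :: rest).getD 1 ' ' = '{' ∧ 1 < (c :: rest).length then
      match scanACD (c :: rest) 0 with
      | some last =>
        if 1 < last ∧ (c :: rest).getD (last - 1) ' ' = '}' then
          '{' :: (loopACD (((c :: rest).drop 2).take (last - 3)) ++   -- s[i+2 : last-1]
            '}' :: loopACD ((c :: rest).drop (last + 1)))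
        else c :: loopACD rest
      | none => c :: loopACD rest
    else c :: loopACD rest
termination_by cs => cs.length
decreasing_by all_goals simp_all [List.length_take, List.length_drop]

def collapse_double_braces_py (s : String) : String := String.mk (loopACD s.toList)

-- ===== PORT B =====
-- one stack pass over the string: match[p] = index of the '}' that closes the '{' at p
def buildMCD : List Char → Nat → List Nat → PySem.Dict Nat Nat → PySem.Dict Nat Nat
  | [], _, _, tbl => tbl
  | c :: rest, idx, stack, tbl =>
    if c = '{' then buildMCD rest (idx + 1) (idx :: stack) tbl
    else if c = '}' then
      match stack with
      | p :: st => buildMCD rest (idx + 1) st (tbl.insert p idx)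
      | [] => buildMCD rest (idx + 1) [] tbl
    else buildMCD rest (idx + 1) stack tbl

-- Source B's `go(lo, hi)`: process s[i:hi] using the precomputed table.
-- (`i < m` is a totality guard only: the built table always maps p to some q > p.)
def goBCD (cs : List Char) (tbl : PySem.Dict Nat Nat) (i hi : Nat) : List Char :=
  if _h : i < hi then
    if cs.getD i ' ' = '{' ∧ i + 1 < hi ∧ cs.getD (i + 1) ' ' = '{' then
      match tbl.get? i with
      | some m =>
        if i < m ∧ m < hi ∧ cs.getD (m - 1) ' ' = '}' then
          '{' :: (goBCD cs tbl (i + 2) (m - 1) ++ '}' :: goBCD cs tbl (m + 1) hi)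
        else cs.getD i ' ' :: goBCD cs tbl (i + 1) hi
      | none => cs.getD i ' ' :: goBCD cs tbl (i + 1) hi
    else cs.getD i ' ' :: goBCD cs tbl (i + 1) hi
  else []
termination_by hi - i
decreasing_by all_goals omega

def collapse_double_braces_py_alt (s : String) : String :=
  let cs := s.toList
  String.mk (goBCD cs (buildMCD cs 0 [] (PySem.Dict.mk [])) 0 cs.length)

-- ===== PRECONDITION & SPEC =====
def Spec_collapse_double_braces_py (s : String) (out : String) : Prop := out = collapse_double_braces_py_alt s
instance (s : String) (out : String) : Decidable (Spec_collapse_double_braces_py s out) := by unfold Spec_collapse_double_braces_py; infer_instance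

-- ===== CLAIM (what is proved, stated in full; the proofs are below) =====
def Claim_equal_collapse_double_braces_py : Prop := ∀ (s : String), Dom_collapse_double_braces_py s → Spec_collapse_double_braces_py s (collapse_double_braces_py s)

-- ===== LEMMAS AND PROOFS =====

-- balance (#'{' - #'}') of a list / of the segment cs[p:r]
def balCD (l : List Char) : Int := (l.count '{' : Int) - (l.count '}' : Int)
def segCD (cs : List Char) (p r : Nat) : Int := balCD ((cs.drop p).take (r - p))

-- cs[p] is an as-yet-unclosed '{' after reading cs[0:k]
def OpenCD (cs : List Char) (p k : Nat) : Prop :=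
  p < k ∧ cs.getD p ' ' = '{' ∧ ∀ r, p < r → r ≤ k → 1 ≤ segCD cs p r

-- the '{' at p is closed exactly by the '}' at q (A's scan from p stops at q)
def IsMCD (cs : List Char) (p q : Nat) : Prop :=
  p < q ∧ q < cs.length ∧ cs.getD p ' ' = '{' ∧ cs.getD q ' ' = '}' ∧
    segCD cs p q = 1 ∧ ∀ r, p < r → r ≤ q → 1 ≤ segCD cs p r


def subCD (cs : List Char) (i hi : Nat) : List Char := (cs.drop i).take (hi - i)

def deltaCD (c : Char) : Int := if c = '{' then 1 else if c = '}' then -1 else 0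

lemma bal_cons (c : Char) (l : List Char) : balCD (c :: l) = deltaCD c + balCD l := by
  simp [balCD, deltaCD, List.count_cons]
  split_ifs with h1 h2 <;> simp_all <;> push_cast <;> ring

lemma bal_take_succ (l : List Char) (r : Nat) (h : r < l.length) :
    balCD (l.take (r + 1)) = balCD (l.take r) + deltaCD (l.getD r ' ') := by
  rw [List.take_succ]
  have h1 : l[r]? = some l[r] := List.getElem?_eq_getElem h
  have h2 : l.getD r ' ' = l[r] := by simp [List.getD, h1]
  simp only [h1, h2, Option.toList_some, balCD, deltaCD, List.count_append, List.count_cons,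
    List.count_nil]
  split_ifs <;> simp_all <;> push_cast <;> ring

lemma seg_self (cs : List Char) (p : Nat) : segCD cs p p = 0 := by
  simp [segCD, balCD]

lemma seg_succ (cs : List Char) (p r : Nat) (hp : p ≤ r) (h : r < cs.length) :
    segCD cs p (r + 1) = segCD cs p r + deltaCD (cs.getD r ' ') := by
  unfold segCD
  have e1 : r + 1 - p = (r - p) + 1 := by omega
  have hlt : r - p < (cs.drop p).length := by simp; omega
  rw [e1, bal_take_succ _ _ hlt]
  congr 2
  have : (cs.drop p)[r-p]? = cs[r]? := by rw [List.getElem?_drop]; congr 1; omega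
  simp [List.getD, this]

lemma nobreak_cons (c : Char) (rest : List Char) (d : Int) (q : Nat)
    (hc : ¬(c = '}' ∧ d = 1)) :
    (∀ r, r < q + 1 → ¬((c :: rest).getD r ' ' = '}' ∧ d + balCD ((c :: rest).take r) = 1)) ↔
      (∀ r, r < q → ¬(rest.getD r ' ' = '}' ∧ (d + deltaCD c) + balCD (rest.take r) = 1)) := by
  constructor
  · intro h r hr
    have := h (r + 1) (by omega)
    simpa [List.take_succ_cons, bal_cons, add_assoc] using this
  · intro h r hr
    match r with
    | 0 => simpa [balCD] using hc
    | r + 1 =>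
      have := h r (by omega)
      simpa [List.take_succ_cons, bal_cons, add_assoc] using this

lemma scanA_iff (l : List Char) (d : Int) (q : Nat) :
    scanACD l d = some q ↔
      (q < l.length ∧ l.getD q ' ' = '}' ∧ d + balCD (l.take q) = 1 ∧
       ∀ r, r < q → ¬(l.getD r ' ' = '}' ∧ d + balCD (l.take r) = 1)) := by
  induction l generalizing d q with
  | nil => simp [scanACD]
  | cons c rest ih =>
    by_cases hbreak : c = '}' ∧ d = 1
    · obtain ⟨rfl, rfl⟩ := hbreak
      have hs : scanACD ('}' :: rest) 1 = some 0 := by simp [scanACD]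
      rw [hs]
      match q with
      | 0 => simp [balCD]
      | q + 1 =>
        constructor
        · intro h; simp at h
        · rintro ⟨h1, h2, h3, h4⟩
          exact absurd ⟨rfl, by simp [balCD]⟩ (h4 0 (by omega))
    · have hs : scanACD (c :: rest) d = (scanACD rest (d + deltaCD c)).map (· + 1) := by
        by_cases h1 : c = '{'
        · simp [scanACD, h1, deltaCD]
        · by_cases h2 : c = '}'
          · have hd : ¬(d - 1 = 0) := by
              intro h; exact hbreak ⟨h2, by omega⟩
            simp [scanACD, h2, deltaCD, sub_eq_add_neg]
            intro h; exact absurd (by omega : d - 1 = 0) hd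
          · simp [scanACD, h1, h2, deltaCD]
      rw [hs]
      match q with
      | 0 =>
        simp only [Option.map_eq_some_iff]
        constructor
        · rintro ⟨a, _, h⟩; omega
        · rintro ⟨h1, h2, h3, _⟩
          simp [balCD] at h3
          exact absurd ⟨h2, h3⟩ hbreak
      | q + 1 =>
        rw [Option.map_eq_some_iff]
        have hex : (∃ a, scanACD rest (d + deltaCD c) = some a ∧ a + 1 = q + 1) ↔
            scanACD rest (d + deltaCD c) = some q := by
          constructor
          · rintro ⟨a, ha, h1⟩
            obtain rfl : a = q := by omega
            exact ha
          · exact fun h => ⟨q, h, rfl⟩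
        rw [hex, ih, ← nobreak_cons c rest d q hbreak]
        constructor <;> rintro ⟨h1, h2, h3, h4⟩
        · refine ⟨by simpa using h1, by simpa using h2, ?_, h4⟩
          rw [List.take_succ_cons, bal_cons]; linarith
        · refine ⟨by simpa using h1, by simpa using h2, ?_, h4⟩
          rw [List.take_succ_cons, bal_cons] at h3; linarith

-- index/segment translation for the slice subCD cs i hi
lemma sub_getD (cs : List Char) (i hi r : Nat) (h : r < hi - i) :
    (subCD cs i hi).getD r ' ' = cs.getD (i + r) ' ' := by
  unfold subCD
  have h1 : ((cs.drop i).take (hi - i))[r]? = (cs.drop i)[r]? := List.getElem?_take_of_lt h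
  have h2 : (cs.drop i)[r]? = cs[i + r]? := List.getElem?_drop ..
  simp [List.getD, h1, h2]

lemma sub_length (cs : List Char) (i hi : Nat) (h : hi ≤ cs.length) :
    (subCD cs i hi).length = hi - i := by
  simp [subCD]; omega

lemma sub_bal_take (cs : List Char) (i hi r : Nat) (h : r ≤ hi - i) :
    balCD ((subCD cs i hi).take r) = segCD cs i (i + r) := by
  unfold subCD segCD
  rw [List.take_take]
  congr 2
  omega

-- no early break below q ↔ depth stays ≥ 1 on (p, q]
lemma noBreak_iff (cs : List Char) (p q : Nat) (hq : q < cs.length)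
    (hp : cs.getD p ' ' = '{') :
    (∀ r, r < q - p → ¬(cs.getD (p + r) ' ' = '}' ∧ segCD cs p (p + r) = 1)) ↔
      (∀ r, p < r → r ≤ q → 1 ≤ segCD cs p r) := by
  constructor
  · intro lhs r
    induction r with
    | zero => omega
    | succ r ihr =>
      intro h1 h2
      by_cases hpr : p = r
      · subst hpr
        rw [seg_succ cs p p le_rfl (by omega), seg_self, hp]
        simp [deltaCD]
      · have h3 := ihr (by omega) (by omega)
        rw [seg_succ cs p r (by omega) (by omega)]
        by_cases hch : cs.getD r ' ' = '}'
        · have hnb := lhs (r - p) (by omega)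
          rw [show p + (r - p) = r by omega] at hnb
          have hne : ¬ segCD cs p r = 1 := fun h => hnb ⟨hch, h⟩
          simp only [deltaCD, hch]
          split_ifs with h' <;> simp_all <;> omega
        · have hd : 0 ≤ deltaCD (cs.getD r ' ') := by
            simp only [deltaCD]; split_ifs <;> simp_all
          omega
  · rintro h r hr ⟨hch, hseg⟩
    have hlt : p + r < cs.length := by omega
    have h1 := h (p + r + 1) (by omega) (by omega)
    rw [seg_succ cs p (p + r) (by omega) hlt, hseg, hch] at h1
    simp [deltaCD] at h1

-- A's scan on the slice = the matching predicate on the original string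
lemma scan_sub_iff (cs : List Char) (i hi k : Nat) (hhi : hi ≤ cs.length) (hi1 : i < hi)
    (hc : cs.getD i ' ' = '{') :
    scanACD (subCD cs i hi) 0 = some k ↔ (IsMCD cs i (i + k) ∧ i + k < hi) := by
  rw [scanA_iff]
  constructor
  · rintro ⟨h1, h2, h3, h4⟩
    rw [sub_length _ _ _ hhi] at h1
    rw [sub_getD _ _ _ _ h1] at h2
    rw [sub_bal_take _ _ _ _ (by omega)] at h3
    have hk0 : 0 < k := by
      rcases Nat.eq_zero_or_pos k with rfl | h
      · simp_all
      · exact h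
    refine ⟨⟨by omega, by omega, hc, h2, by simpa using h3, ?_⟩, by omega⟩
    rw [← noBreak_iff cs i (i + k) (by omega) hc]
    intro r hr
    have h5 := h4 r (by omega)
    rw [sub_getD _ _ _ _ (by omega), sub_bal_take _ _ _ _ (by omega)] at h5
    simpa using h5
  · rintro ⟨⟨hik, hlen, _, hq, hseg, hge⟩, hhik⟩
    refine ⟨by rw [sub_length _ _ _ hhi]; omega, ?_, ?_, ?_⟩
    · rw [sub_getD _ _ _ _ (by omega)]; exact hq
    · rw [sub_bal_take _ _ _ _ (by omega)]; simpa using hseg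
    · intro r hr
      have hnb := (noBreak_iff cs i (i + k) (by omega) hc).mpr hge
      have h5 := hnb r (by omega)
      rw [sub_getD _ _ _ _ (by omega), sub_bal_take _ _ _ _ (by omega)]
      simpa using h5

lemma isM_break (cs : List Char) (p q q' : Nat) (h : IsMCD cs p q) (h' : IsMCD cs p q')
    (hlt : q < q') : False := by
  obtain ⟨h1, h2, h3, h4, h5, h6⟩ := h
  obtain ⟨h1', h2', h3', h4', h5', h6'⟩ := h'
  have hz : segCD cs p (q + 1) = 0 := by
    rw [seg_succ cs p q (by omega) h2, h5, h4]; simp [deltaCD]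
  have := h6' (q + 1) (by omega) (by omega)
  omega

lemma isM_fun (cs : List Char) (p q q' : Nat) (h : IsMCD cs p q) (h' : IsMCD cs p q') : q = q' := by
  rcases lt_trichotomy q q' with hlt | heq | hlt
  · exact absurd (isM_break cs p q q' h h' hlt) id
  · exact heq
  · exact absurd (isM_break cs p q' q h' h hlt) id

def InvCD (cs : List Char) (k : Nat) (stack : List Nat) (tbl : PySem.Dict Nat Nat) : Prop :=
  (∀ j, (hj : j < stack.length) → OpenCD cs stack[j] k ∧ segCD cs stack[j] k = (j : Int) + 1) ∧
  (∀ p, OpenCD cs p k → p ∈ stack) ∧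
  (∀ p q, tbl.get? p = some q → q < k ∧ IsMCD cs p q) ∧
  (∀ p q, q < k → IsMCD cs p q → tbl.get? p = some q)

lemma open_weaken (cs : List Char) (p k : Nat) (h : OpenCD cs p (k + 1)) (hp : p ≠ k) :
    OpenCD cs p k := by
  obtain ⟨h1, h2, h3⟩ := h
  exact ⟨by omega, h2, fun r hr1 hr2 => h3 r hr1 (by omega)⟩

lemma isM_open (cs : List Char) (p q : Nat) (h : IsMCD cs p q) : OpenCD cs p q := by
  obtain ⟨h1, h2, h3, h4, h5, h6⟩ := h
  exact ⟨h1, h3, h6⟩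

lemma inv_step (cs : List Char) (k : Nat) (stack : List Nat) (tbl : PySem.Dict Nat Nat)
    (hk : k < cs.length) (hInv : InvCD cs k stack tbl) :
    ∃ stack2 tbl2, buildMCD (cs.drop k) k stack tbl = buildMCD (cs.drop (k + 1)) (k + 1) stack2 tbl2 ∧
      InvCD cs (k + 1) stack2 tbl2 := by
  obtain ⟨hS1, hS2, hT1, hT2⟩ := hInv
  have hdk : cs.drop k = cs[k] :: cs.drop (k + 1) := List.drop_eq_getElem_cons hk
  have hgd : cs.getD k ' ' = cs[k] := List.getD_eq_getElem cs ' ' hk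
  by_cases h1 : cs[k] = '{'
  · refine ⟨k :: stack, tbl, ?_, ?_, ?_, ?_, ?_⟩
    · rw [hdk]; simp [buildMCD, h1]
    · intro j hj
      match j with
      | 0 =>
        simp only [List.getElem_cons_zero]
        have hseg : segCD cs k (k + 1) = 1 := by
          rw [seg_succ cs k k le_rfl hk, seg_self, hgd, h1]; simp [deltaCD]
        refine ⟨⟨by omega, by rw [hgd, h1], ?_⟩, by simpa using hseg⟩
        intro r hr1 hr2
        have : r = k + 1 := by omega
        subst this; omega
      | j + 1 =>
        simp only [List.getElem_cons_succ]
        have hj' : j < stack.length := by simpa using hj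
        obtain ⟨⟨ho1, ho2, ho3⟩, hseg⟩ := hS1 j hj'
        have hstep : segCD cs stack[j] (k + 1) = segCD cs stack[j] k + 1 := by
          rw [seg_succ cs stack[j] k (by omega) hk, hgd, h1]; simp [deltaCD]
        refine ⟨⟨by omega, ho2, ?_⟩, ?_⟩
        · intro r hr1 hr2
          rcases Nat.lt_or_ge r (k + 1) with h | h
          · exact ho3 r hr1 (by omega)
          · have : r = k + 1 := by omega
            subst this; rw [hstep]
            have := ho3 k ?_ le_rfl
            · omega
            · omega
        · show segCD cs stack[j] (k+1) = (↑(j+1) : Int) + 1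
          rw [hstep, hseg]; push_cast; ring
    · intro p hOpen
      by_cases hpk : p = k
      · subst hpk; exact List.mem_cons_self
      · exact List.mem_cons_of_mem _ (hS2 p (open_weaken cs p k hOpen hpk))
    · intro p q hget
      have := hT1 p q hget
      exact ⟨by omega, this.2⟩
    · intro p q hq hIsM
      by_cases hqk : q = k
      · subst hqk
        have := hIsM.2.2.2.1
        rw [hgd, h1] at this; exact absurd this (by decide)
      · exact hT2 p q (by omega) hIsM
  · by_cases h2 : cs[k] = '}'
    · match hst : stack with
      | p :: st =>
        obtain ⟨⟨hp1, hp2, hp3⟩, hpseg⟩ := hS1 0 (by simp)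
        simp only [List.getElem_cons_zero] at hp1 hp2 hp3 hpseg
        have hpseg1 : segCD cs p k = 1 := by simpa using hpseg
        have hIsMpk : IsMCD cs p k :=
          ⟨hp1, hk, hp2, by rw [hgd, h2], hpseg1, hp3⟩
        refine ⟨st, tbl.insert p k, ?_, ?_, ?_, ?_, ?_⟩
        · rw [hdk]; simp [buildMCD, h2]
        · intro j hj
          have hj' : j + 1 < (p :: st).length := by simpa using hj
          obtain ⟨⟨ho1, ho2, ho3⟩, hseg⟩ := hS1 (j + 1) hj'
          simp only [List.getElem_cons_succ] at ho1 ho2 ho3 hseg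
          have hstep : segCD cs st[j] (k + 1) = segCD cs st[j] k - 1 := by
            rw [seg_succ cs st[j] k (by omega) hk, hgd, h2]; simp [deltaCD]; ring
          refine ⟨⟨by omega, ho2, ?_⟩, ?_⟩
          · intro r hr1 hr2
            rcases Nat.lt_or_ge r (k + 1) with h | h
            · exact ho3 r hr1 (by omega)
            · have : r = k + 1 := by omega
              subst this; rw [hstep, hseg]; push_cast; omega
          · rw [hstep, hseg]; push_cast; ring
        · intro p' hOpen'
          have hp'k : p' ≠ k := by
            intro h; subst h
            have := hOpen'.2.1; rw [hgd, h2] at this; exact absurd this (by decide)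
          have hmem := hS2 p' (open_weaken cs p' k hOpen' hp'k)
          rcases List.mem_cons.mp hmem with heq | hmem2
          · subst heq
            have := hOpen'.2.2 (k + 1) (by omega) le_rfl
            rw [seg_succ cs p' k (by omega) hk, hgd, h2, hpseg1] at this
            simp [deltaCD] at this
          · exact hmem2
        · intro p' q' hget
          rw [PySem.Dict.get?_insert] at hget
          split at hget
          · next heq =>
            injection hget with h
            subst heq h
            exact ⟨by omega, hIsMpk⟩
          · have := hT1 p' q' hget; exact ⟨by omega, this.2⟩
        · intro p' q' hq' hIsM'
          by_cases hq'k : q' = k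
          · rw [hq'k] at hIsM' ⊢
            have hOp : OpenCD cs p' k := isM_open cs p' k hIsM'
            have hmem := hS2 p' hOp
            have hp'p : p' = p := by
              rcases List.mem_cons.mp hmem with heq | hmem2
              · exact heq
              · obtain ⟨j, hj, hje⟩ := List.mem_iff_getElem.mp hmem2
                obtain ⟨_, hseg⟩ := hS1 (j + 1) (by simpa using Nat.succ_lt_succ hj)
                simp only [List.getElem_cons_succ] at hseg
                rw [hje] at hseg
                have := hIsM'.2.2.2.2.1
                rw [this] at hseg; push_cast at hseg; omega
            rw [PySem.Dict.get?_insert, if_pos hp'p]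
          · have hold := hT2 p' q' (by omega) hIsM'
            have hp'p : p' ≠ p := by
              intro h; subst h
              have := (hT1 p' q' hold).2
              exact hq'k (isM_fun cs p' q' k this hIsMpk)
            rw [PySem.Dict.get?_insert]; simpa [hp'p] using hold
      | [] =>
        refine ⟨[], tbl, ?_, ?_, ?_, ?_, ?_⟩
        · rw [hdk]; simp [buildMCD, h2]
        · intro j hj; simp at hj
        · intro p hOpen
          have hpk : p ≠ k := by
            intro h; subst h
            have := hOpen.2.1; rw [hgd, h2] at this; exact absurd this (by decide)
          exact hS2 p (open_weaken cs p k hOpen hpk)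
        · intro p q hget
          have := hT1 p q hget; exact ⟨by omega, this.2⟩
        · intro p q hq hIsM
          by_cases hqk : q = k
          · rw [hqk] at hIsM
            have := hS2 p (isM_open cs p k hIsM)
            simp at this
          · exact hT2 p q (by omega) hIsM
    · refine ⟨stack, tbl, ?_, ?_, ?_, ?_, ?_⟩
      · rw [hdk]; simp [buildMCD, h1, h2]
      · intro j hj
        obtain ⟨⟨ho1, ho2, ho3⟩, hseg⟩ := hS1 j hj
        have hstep : segCD cs stack[j] (k + 1) = segCD cs stack[j] k := by
          rw [seg_succ cs stack[j] k (by omega) hk, hgd]; simp [deltaCD, h1, h2]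
        refine ⟨⟨by omega, ho2, ?_⟩, by rw [hstep]; exact hseg⟩
        intro r hr1 hr2
        rcases Nat.lt_or_ge r (k + 1) with h | h
        · exact ho3 r hr1 (by omega)
        · have : r = k + 1 := by omega
          subst this; rw [hstep, hseg]; push_cast; omega
      · intro p hOpen
        have hpk : p ≠ k := by
          intro h; subst h
          have := hOpen.2.1; rw [hgd] at this; exact h1 this
        exact hS2 p (open_weaken cs p k hOpen hpk)
      · intro p q hget
        have := hT1 p q hget; exact ⟨by omega, this.2⟩
      · intro p q hq hIsM
        by_cases hqk : q = k
        · subst hqk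
          have := hIsM.2.2.2.1; rw [hgd] at this; exact absurd this h2
        · exact hT2 p q (by omega) hIsM

lemma buildM_inv (cs : List Char) : ∀ m k stack tbl, m = cs.length - k → k ≤ cs.length →
    InvCD cs k stack tbl →
    ∃ stack', InvCD cs cs.length stack' (buildMCD (cs.drop k) k stack tbl) := by
  intro m
  induction m with
  | zero =>
    intro k stack tbl hm hk hInv
    have : k = cs.length := by omega
    subst this
    simp only [List.drop_length, buildMCD]
    exact ⟨stack, hInv⟩
  | succ m ihm =>
    intro k stack tbl hm hk hInv
    have hklt : k < cs.length := by omega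
    obtain ⟨stack2, tbl2, heq, hInv2⟩ := inv_step cs k stack tbl hklt hInv
    rw [heq]
    exact ihm (k + 1) stack2 tbl2 (by omega) (by omega) hInv2

lemma buildM_get (cs : List Char) (p q : Nat) :
    (buildMCD cs 0 [] (PySem.Dict.mk [])).get? p = some q ↔ IsMCD cs p q := by
  have hInv0 : InvCD cs 0 [] (PySem.Dict.mk []) := by
    refine ⟨?_, ?_, ?_, ?_⟩
    · intro j hj; simp at hj
    · intro p hOpen; exact absurd hOpen.1 (by omega)
    · intro p q hget; simp [PySem.Dict.get?] at hget
    · intro p q hq _; omega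
  obtain ⟨stack', h1, h2, h3, h4⟩ := buildM_inv cs (cs.length - 0) 0 [] (PySem.Dict.mk []) rfl (by omega) hInv0
  rw [show cs = cs.drop 0 from rfl]
  constructor
  · intro h; exact (h3 p q h).2
  · intro h; exact h4 p q h.2.1 h

lemma loopA_cons (c : Char) (rest : List Char) :
    loopACD (c :: rest) =
      if c = '{' ∧ (c :: rest).getD 1 ' ' = '{' ∧ 1 < (c :: rest).length then
        match scanACD (c :: rest) 0 with
        | some last =>
          if 1 < last ∧ (c :: rest).getD (last - 1) ' ' = '}' then
            '{' :: (loopACD (((c :: rest).drop 2).take (last - 3)) ++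
              '}' :: loopACD ((c :: rest).drop (last + 1)))
          else c :: loopACD rest
        | none => c :: loopACD rest
      else c :: loopACD rest := by
  rw [loopACD]

lemma sub_cons (cs : List Char) (i hi : Nat) (h1 : i < hi) (h2 : hi ≤ cs.length) :
    subCD cs i hi = cs.getD i ' ' :: subCD cs (i + 1) hi := by
  unfold subCD
  have hil : i < cs.length := by omega
  rw [List.drop_eq_getElem_cons hil, List.getD_eq_getElem cs ' ' hil,
    show hi - i = (hi - (i + 1)) + 1 by omega, List.take_succ_cons]

lemma goB_eq_loopA (cs : List Char) : ∀ m i hi, hi - i ≤ m → hi ≤ cs.length →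
    goBCD cs (buildMCD cs 0 [] (PySem.Dict.mk [])) i hi = loopACD (subCD cs i hi) := by
  intro fu
  induction fu with
  | zero =>
    intro i hi hm hhi
    have hge : ¬ i < hi := by omega
    rw [goBCD, dif_neg hge]
    have h0 : subCD cs i hi = [] := by unfold subCD; rw [show hi - i = 0 by omega]; simp
    rw [h0, loopACD]
  | succ fu ih =>
    intro i hi hm hhi
    by_cases hih : i < hi
    · have hcons := sub_cons cs i hi hih hhi
      have hlen : (subCD cs i hi).length = hi - i := sub_length cs i hi hhi
      rw [goBCD, dif_pos hih, hcons, loopA_cons, ← hcons]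
      by_cases hc1 : cs.getD i ' ' = '{'
      · by_cases hc2 : i + 1 < hi
        · by_cases hc3 : cs.getD (i + 1) ' ' = '{'
          · have hgd1 : (subCD cs i hi).getD 1 ' ' = cs.getD (i + 1) ' ' := by
              rw [sub_getD cs i hi 1 (by omega)]
            have hcondA : (cs.getD i ' ' = '{' ∧ (subCD cs i hi).getD 1 ' ' = '{' ∧
                1 < (subCD cs i hi).length) := ⟨hc1, by rw [hgd1]; exact hc3, by omega⟩
            rw [if_pos ⟨hc1, hc2, hc3⟩, if_pos hcondA]
            cases htbl : (buildMCD cs 0 [] (PySem.Dict.mk [])).get? i with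
            | some m =>
              have hIsM : IsMCD cs i m := (buildM_get cs i m).mp htbl
              have him : i < m := hIsM.1
              by_cases hmhi : m < hi
              · have hscan : scanACD (subCD cs i hi) 0 = some (m - i) := by
                  rw [scan_sub_iff cs i hi (m - i) hhi hih hc1]
                  rw [show i + (m - i) = m by omega]
                  exact ⟨hIsM, hmhi⟩
                rw [hscan]
                simp only []
                have hmi1 : i + 1 < m := by
                  rcases Nat.lt_or_ge (i + 1) m with h | h
                  · exact h
                  · have hmeq : m = i + 1 := by omega
                    have hch := hIsM.2.2.2.1
                    rw [hmeq, hc3] at hch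
                    exact absurd hch (by decide)
                have hgdm : (subCD cs i hi).getD (m - i - 1) ' ' = cs.getD (m - 1) ' ' := by
                  rw [sub_getD cs i hi (m - i - 1) (by omega), show i + (m - i - 1) = m - 1 by omega]
                by_cases hbr : cs.getD (m - 1) ' ' = '}'
                · rw [if_pos ⟨by omega, hmhi, hbr⟩,
                    if_pos (⟨by omega, by rw [hgdm]; exact hbr⟩ :
                      1 < m - i ∧ (subCD cs i hi).getD (m - i - 1) ' ' = '}')]
                  have hinner : ((subCD cs i hi).drop 2).take (m - i - 3) = subCD cs (i + 2) (m - 1) := by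
                    unfold subCD
                    rw [List.drop_take, List.drop_drop, List.take_take]
                    congr 1 <;> omega
                  have htail : (subCD cs i hi).drop (m - i + 1) = subCD cs (m + 1) hi := by
                    unfold subCD
                    rw [List.drop_take, List.drop_drop]
                    congr 1
                    · omega
                    · congr 1
                      omega
                  rw [hinner, htail, ← ih (i + 2) (m - 1) (by omega) (by omega),
                    ← ih (m + 1) hi (by omega) hhi]
                · rw [if_neg (show ¬(i < m ∧ m < hi ∧ cs.getD (m - 1) ' ' = '}') from
                      fun h => hbr h.2.2),
                    if_neg (show ¬(1 < m - i ∧ (subCD cs i hi).getD (m - i - 1) ' ' = '}') from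
                      fun h => hbr (by rw [← hgdm]; exact h.2)),
                    ih (i + 1) hi (by omega) hhi]
              · have hscan : scanACD (subCD cs i hi) 0 = none := by
                  cases hsc : scanACD (subCD cs i hi) 0 with
                  | none => rfl
                  | some k =>
                    obtain ⟨hIsMk, hkhi⟩ := (scan_sub_iff cs i hi k hhi hih hc1).mp hsc
                    have hg := (buildM_get cs i (i + k)).mpr hIsMk
                    rw [htbl] at hg
                    injection hg with h
                    omega
                rw [hscan]
                simp only []
                rw [if_neg (show ¬(i < m ∧ m < hi ∧ cs.getD (m - 1) ' ' = '}') from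
                  fun h => hmhi h.2.1), ih (i + 1) hi (by omega) hhi]
            | none =>
              have hscan : scanACD (subCD cs i hi) 0 = none := by
                cases hsc : scanACD (subCD cs i hi) 0 with
                | none => rfl
                | some k =>
                  obtain ⟨hIsMk, hkhi⟩ := (scan_sub_iff cs i hi k hhi hih hc1).mp hsc
                  have hg := (buildM_get cs i (i + k)).mpr hIsMk
                  rw [htbl] at hg
                  simp at hg
              rw [hscan]
              simp only []
              rw [ih (i + 1) hi (by omega) hhi]
          · rw [if_neg (fun h => hc3 h.2.2), if_neg ?_, ih (i + 1) hi (by omega) hhi]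
            rintro ⟨_, hg1, _⟩
            rw [sub_getD cs i hi 1 (by omega)] at hg1
            exact hc3 hg1
        · rw [if_neg (fun h => hc2 h.2.1), if_neg ?_, ih (i + 1) hi (by omega) hhi]
          rintro ⟨_, _, hlg⟩
          omega
      · rw [if_neg (fun h => hc1 h.1), if_neg (fun h => hc1 h.1),
          ih (i + 1) hi (by omega) hhi]
    · rw [goBCD, dif_neg hih]
      have h0 : subCD cs i hi = [] := by unfold subCD; rw [show hi - i = 0 by omega]; simp
      rw [h0, loopACD]

-- ===== VERDICT (by name: the statement is the Claim_ definition above) =====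
theorem collapse_double_braces_py_spec : Claim_equal_collapse_double_braces_py := by
  intro s _
  unfold Spec_collapse_double_braces_py collapse_double_braces_py collapse_double_braces_py_alt
  have h := goB_eq_loopA s.toList s.toList.length 0 s.toList.length (by omega) (by omega)
  have h2 : subCD s.toList 0 s.toList.length = s.toList := by simp [subCD]
  rw [h2] at h
  show String.mk (loopACD s.toList) = String.mk (goBCD s.toList (buildMCD s.toList 0 [] (PySem.Dict.mk [])) 0 s.toList.length)
  exact congrArg String.mk h.symm
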